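-- pv_equiv track=rewrite | github.com/konszymanski/leetcode-dataset | obfuscated_solutions/python/2147-number-of-ways-to-divide-a-long-corridor/solution_1_universal_wrap.py | numberOfWays
-- ===== SOURCE A (Python) =====
-- def numberOfWays(corridor: str) ->int:
--     if True:
--         MOD = 1000000007
--     cache = [([-1] * 3) for _ in range(len(corridor))]
--
--     def count(index, seats):
--         if index == len(corridor):
--             if True:
--                 return 1 if seats == 2 else 0
--         if cache[index][seats] != -1:
--             if True:
--                 return cache[index][seats]
--         if seats == 2:
--             if corridor[index] == 'S':
--                 result = count(index + 1, 1)
--             else: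
--                 result = (count(index + 1, 0) + count(index + 1, 2)) % MOD
--         elif corridor[index] == 'S':
--             if True:
--                 result = count(index + 1, seats + 1)
--         elif True:
--             result = count(index + 1, seats)
--         if True:
--             cache[index][seats] = result
--         if True:
--             return cache[index][seats]
--     if True:
--         return count(0, 0)
-- ===== SOURCE B (Python) =====
-- def numberOfWays(corridor: str) -> int:
--     MOD = 1000000007
--     seats = [i for i, c in enumerate(corridor) if c == 'S']
--     if not seats or len(seats) % 2:
--         return 0
--
--     def gaps(prev_end, rest):
--         if not rest:
--             return 1
--         return (rest[0] - prev_end) * gaps(rest[1], rest[2:]) % MOD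
--
--     return gaps(seats[1], seats[2:])
-- ===== Notes on version B (the rewrite author's own statement) =====
-- stated objective: simpler
-- what changed: Replaced A's three-state top-down memoized DP over every index with a single pass collecting seat indices followed by a product of the gaps between consecutive seat pairs mod 1e9+7 (0 if the seat count is zero or odd).
import Mathlib
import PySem

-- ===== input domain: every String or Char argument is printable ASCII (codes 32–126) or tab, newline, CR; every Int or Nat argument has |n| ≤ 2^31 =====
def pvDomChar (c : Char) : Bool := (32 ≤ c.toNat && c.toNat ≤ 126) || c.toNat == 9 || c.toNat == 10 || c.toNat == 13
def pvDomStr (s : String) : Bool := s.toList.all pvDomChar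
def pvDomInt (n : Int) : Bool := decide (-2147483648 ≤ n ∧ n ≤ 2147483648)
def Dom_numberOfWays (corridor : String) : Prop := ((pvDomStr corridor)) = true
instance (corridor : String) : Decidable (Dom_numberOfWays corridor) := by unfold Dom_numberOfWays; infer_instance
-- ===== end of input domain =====

-- B replaces A's three-state top-down DP over every character by a one-pass collection of
-- the seat indices followed by a product of pair-to-pair gaps mod 1e9+7 (objective: simpler).

def pvMOD : Int := 1000000007

-- ===== PORT A =====
-- A's memo cache is pure memoisation (value-transparent); the port is the same recursion
-- on (remaining corridor, seats), without the cache.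
def countA : List Char → Int → Int
  | [], seats => if seats == 2 then 1 else 0
  | c :: rest, seats =>
    if seats == 2 then
      if c == 'S' then countA rest 1
      else PySem.Int.mod (countA rest 0 + countA rest 2) pvMOD
    else if c == 'S' then countA rest (seats + 1)
    else countA rest seats

def numberOfWays (corridor : String) : Int := countA corridor.toList 0

-- ===== PORT B =====
-- seats = [i for i, c in enumerate(corridor) if c == 'S']
def pvSeats (l : List Char) : List Int :=
  ((PySem.List.enumerate l 0).filter (fun p => p.2 == 'S')).map (fun p => p.1)

-- gaps(prev_end, rest); the one-element case is unreachable in B (gaps is only ever called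
-- on even-length lists; Python's rest[1] would raise there)
def gapsB : Int → List Int → Int
  | _, [] => 1
  | _, [_] => 0
  | p, a :: b :: rest => PySem.Int.mod ((a - p) * gapsB b rest) pvMOD

def numberOfWays_alt (corridor : String) : Int :=
  let seats := pvSeats corridor.toList
  if seats.isEmpty || seats.length % 2 == 1 then 0
  else
    match seats with
    | _ :: b :: rest => gapsB b rest   -- gaps(seats[1], seats[2:])
    | _ => 0                           -- unreachable: seats is nonempty of even length here

-- ===== PRECONDITION & SPEC =====
def Spec_numberOfWays (corridor : String) (out : Int) : Prop := out = numberOfWays_alt corridor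
instance (corridor : String) (out : Int) : Decidable (Spec_numberOfWays corridor out) := by unfold Spec_numberOfWays; infer_instance

-- ===== CLAIM (what is proved, stated in full; the proofs are below) =====
def Claim_equal_numberOfWays : Prop := ∀ (corridor : String), Dom_numberOfWays corridor → Spec_numberOfWays corridor (numberOfWays corridor)

-- ===== LEMMAS AND PROOFS =====

-- seat indices of l when its first character has index s (generalisation of pvSeats)
def seatsFrom (s : Int) (l : List Char) : List Int :=
  ((PySem.List.enumerate l s).filter (fun p => p.2 == 'S')).map (fun p => p.1)

theorem seatsFrom_zero (l : List Char) : seatsFrom 0 l = pvSeats l := rfl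

theorem seatsFrom_nil (s : Int) : seatsFrom s [] = [] := rfl

theorem seatsFrom_cons (s : Int) (c : Char) (r : List Char) :
    seatsFrom s (c :: r) =
      if c = 'S' then s :: seatsFrom (s + 1) r else seatsFrom (s + 1) r := by
  by_cases hc : c = 'S' <;>
    simp [seatsFrom, PySem.List.enumerate_cons, hc]

theorem pvMOD_pos : (0 : Int) < pvMOD := by norm_num [pvMOD]

theorem gapsB_bounds (p : Int) (xs : List Int) : 0 ≤ gapsB p xs ∧ gapsB p xs < pvMOD := by
  fun_induction gapsB p xs with
  | case1 => norm_num [gapsB, pvMOD]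
  | case2 => norm_num [gapsB, pvMOD]
  | case3 p a b rest ih =>
      exact ⟨PySem.Int.mod_nonneg _ pvMOD_pos, PySem.Int.mod_lt _ pvMOD_pos⟩

theorem modM_zero : PySem.Int.mod 0 pvMOD = 0 := by
  rw [PySem.Int.mod_eq_emod_of_pos pvMOD_pos]; simp

theorem modM_one : PySem.Int.mod 1 pvMOD = 1 := by
  rw [PySem.Int.mod_eq_emod_of_pos pvMOD_pos]; norm_num [pvMOD]

theorem modM_add_right (K z : Int) :
    PySem.Int.mod (K + PySem.Int.mod z pvMOD) pvMOD = PySem.Int.mod (K + z) pvMOD := by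
  simp only [PySem.Int.mod_eq_emod_of_pos pvMOD_pos]
  rw [Int.add_emod, Int.emod_emod_of_dvd _ dvd_rfl, ← Int.add_emod]

theorem gapsB_self_eq_mod (x : Int) (xs : List Int) :
    PySem.Int.mod (gapsB x xs) pvMOD = gapsB x xs := by
  rw [PySem.Int.mod_eq_emod_of_pos pvMOD_pos]
  exact Int.emod_eq_of_lt (gapsB_bounds x xs).1 (gapsB_bounds x xs).2

-- closed forms for countA in the three seat states, parameterised by the start index s
def F0core : List Int → Int
  | _ :: b :: rest => gapsB b rest
  | _ => 0

def F1core : List Int → Int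
  | a :: rest => gapsB a rest
  | [] => 0

def F0 (s : Int) (l : List Char) : Int :=
  if (seatsFrom s l).length % 2 = 0 then F0core (seatsFrom s l) else 0

def F1 (s : Int) (l : List Char) : Int :=
  if (seatsFrom s l).length % 2 = 1 then F1core (seatsFrom s l) else 0

def F2 (s : Int) (l : List Char) : Int :=
  if (seatsFrom s l).length % 2 = 0 then gapsB (s - 1) (seatsFrom s l) else 0

theorem gapsB_pair_head (s a : Int) (rest : List Int) :
    gapsB (s - 1) (s :: a :: rest) = gapsB a rest := by
  rw [show gapsB (s - 1) (s :: a :: rest)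
        = PySem.Int.mod ((s - (s - 1)) * gapsB a rest) pvMOD from rfl,
      show s - (s - 1) = (1 : Int) by ring, one_mul, gapsB_self_eq_mod]

theorem countA_eq_F (l : List Char) :
    ∀ s : Int, countA l 0 = F0 s l ∧ countA l 1 = F1 s l ∧ countA l 2 = F2 s l := by
  induction l with
  | nil =>
      intro s
      refine ⟨?_, ?_, ?_⟩ <;>
        simp [countA, F0, F1, F2, F0core, seatsFrom_nil, gapsB]
  | cons c r ih =>
      intro s
      obtain ⟨ih0, ih1, ih2⟩ := ih (s + 1)
      by_cases hc : c = 'S'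
      · have hseat : seatsFrom s (c :: r) = s :: seatsFrom (s + 1) r := by
          rw [seatsFrom_cons]; simp [hc]
        refine ⟨?_, ?_, ?_⟩
        · -- state 0 steps to state 1
          have hstep : countA (c :: r) 0 = countA r 1 := by simp [countA, hc]
          rw [hstep, ih1, F0, F1, hseat]
          rcases hz : seatsFrom (s + 1) r with _ | ⟨a, rest⟩
          · norm_num [F0core, F1core]
          · simp only [List.length_cons, F0core, F1core]
            split_ifs <;> first | rfl | omega
        · -- state 1 steps to state 2
          have hstep : countA (c :: r) 1 = countA r 2 := by simp [countA, hc]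
          rw [hstep, ih2, F1, F2, hseat]
          simp only [List.length_cons, F1core, add_sub_cancel_right]
          split_ifs <;> first | rfl | omega
        · -- state 2 steps back to state 1 (a cut is forced before this seat)
          have hstep : countA (c :: r) 2 = countA r 1 := by simp [countA, hc]
          rw [hstep, ih1, F1, F2, hseat]
          rcases hz : seatsFrom (s + 1) r with _ | ⟨a, rest⟩
          · norm_num [F1core]
          · simp only [List.length_cons, F1core, gapsB_pair_head]
            split_ifs <;> first | rfl | omega
      · have hseat : seatsFrom s (c :: r) = seatsFrom (s + 1) r := by
          rw [seatsFrom_cons]; simp [hc]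
        refine ⟨?_, ?_, ?_⟩
        · have hstep : countA (c :: r) 0 = countA r 0 := by simp [countA, hc]
          rw [hstep, ih0, F0, F0, hseat]
        · have hstep : countA (c :: r) 1 = countA r 1 := by simp [countA, hc]
          rw [hstep, ih1, F1, F1, hseat]
        · -- state 2 on a plain tile: cut or not
          have hstep : countA (c :: r) 2
              = PySem.Int.mod (countA r 0 + countA r 2) pvMOD := by simp [countA, hc]
          rw [hstep, ih0, ih2, F0, F2, F2, hseat]
          rcases hz : seatsFrom (s + 1) r with _ | ⟨a, _ | ⟨b, rest⟩⟩
          · simp only [List.length_nil, F0core]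
            norm_num [gapsB, modM_one]
          · -- a single seat in r: odd count, both sides are 0
            simp only [List.length_cons, List.length_nil, F0core]
            norm_num [gapsB, modM_zero]
          · simp only [List.length_cons, F0core, add_sub_cancel_right]
            split_ifs with h1
            · rw [show gapsB s (a :: b :: rest)
                    = PySem.Int.mod ((a - s) * gapsB b rest) pvMOD from rfl,
                  show gapsB (s - 1) (a :: b :: rest)
                    = PySem.Int.mod ((a - (s - 1)) * gapsB b rest) pvMOD from rfl,
                  modM_add_right]
              congr 1
              ring
            · rw [add_zero, modM_zero]

-- ===== VERDICT (by name: the statement is the Claim_ definition above) =====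
theorem numberOfWays_spec : Claim_equal_numberOfWays := by
  intro corridor _
  unfold Spec_numberOfWays numberOfWays numberOfWays_alt
  rw [(countA_eq_F corridor.toList 0).1, F0, seatsFrom_zero]
  rcases hz : pvSeats corridor.toList with _ | ⟨a, _ | ⟨b, rest⟩⟩
  · simp [F0core]
  · simp
  · simp only [F0core, List.length_cons, List.isEmpty_cons, Bool.false_or]
    by_cases h : (rest.length + 1 + 1) % 2 = 0
    · simp [h]
    · have hb : ((rest.length + 1 + 1) % 2 == 1) = true := by simp; omega
      simp [h, hb]
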